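-- pv_equiv track=rewrite | github.com/jespb/AdventOfCode | 2025/day10/main.py | valid_f
-- ===== SOURCE A (Python) =====
-- def apply_f(commands, sol):
-- 	base = [0]*len(commands[0])
-- 	for si in range(len(sol)):
-- 		cm = [v*sol[si] for v in commands[si]]
-- 		for ind in range(len(cm)):
-- 			base[ind] += cm[ind]
-- 	return base
--
-- def valid_f(target, commands, sol, max_clicks):
-- 	if sum(sol) > max_clicks:
-- 		return -1
--
-- 	base = apply_f(commands, sol)
--
-- 	for si in range(len(base)):
-- 		if base[si]>target[si]:
-- 			return -1
-- 	if base == target: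
-- 		return 1
-- 	else:
-- 		return 0
-- ===== SOURCE B (Python) =====
-- def valid_f(target, commands, sol, max_clicks):
-- 	if sum(sol) > max_clicks:
-- 		return -1
-- 	base = [sum(w * v for w, v in zip(sol, col)) for col in zip(*commands)]
-- 	if any(b > t for b, t in zip(base, target)):
-- 		return -1
-- 	return 1 if base == target else 0
-- ===== Notes on version B (the rewrite author's own statement) =====
-- stated objective: idiomatic
-- what changed: B transposes the matrix with zip(*commands) and computes each coordinate as a zip-based dot product, replacing A's row-major in-place accumulation vector and index loops; the checks become any() over zipped pairs and plain list equality; Pre_ restricts to rectangular command matrices whose width does not exceed len(target), since on ragged rows zip's truncation legitimately differs from A's per-row index bounds and a shorter target makes A raise IndexError.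
-- outside the precondition, e.g. on valid_f([1, 1], [[1, 1], [2]], [1], 5): A returns 1, B returns 0; on valid_f([6, 1], [[1, 1], [5]], [1, 1], 9): A returns 1, B returns 0; on valid_f([0], [[1, 9]], [1], 5): A returns -1, B returns -1
import Mathlib
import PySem

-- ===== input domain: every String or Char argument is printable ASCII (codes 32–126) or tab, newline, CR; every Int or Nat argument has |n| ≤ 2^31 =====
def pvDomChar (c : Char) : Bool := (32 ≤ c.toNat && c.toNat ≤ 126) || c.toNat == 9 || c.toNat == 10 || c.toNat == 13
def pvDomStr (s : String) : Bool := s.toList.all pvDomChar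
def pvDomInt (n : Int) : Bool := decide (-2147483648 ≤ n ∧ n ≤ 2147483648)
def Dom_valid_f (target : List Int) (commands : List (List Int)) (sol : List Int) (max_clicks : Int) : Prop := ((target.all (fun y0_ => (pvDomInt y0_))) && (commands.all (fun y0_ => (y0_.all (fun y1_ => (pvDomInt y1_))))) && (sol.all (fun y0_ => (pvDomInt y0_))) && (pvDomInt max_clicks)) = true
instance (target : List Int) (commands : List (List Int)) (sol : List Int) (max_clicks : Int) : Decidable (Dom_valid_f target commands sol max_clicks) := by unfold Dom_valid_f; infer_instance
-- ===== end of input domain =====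

-- B is the idiomatic zip/transpose formulation: column dot products via zip(*commands) and any()/list equality, replacing A's row-major in-place accumulation and index loops (same cost).


-- ===== PORT A =====
-- 'for ind in range(len(cm)): base[ind] += cm[ind]' — structural recursion over the same
-- state (Python raises IndexError when cm is longer than base; Pre_ excludes that).
def pvAddRow : List Int → List Int → List Int
  | b, [] => b
  | [], _ :: _ => []
  | b :: bs, c :: cs => (b + c) :: pvAddRow bs cs

def apply_f (commands : List (List Int)) (sol : List Int) : List Int :=
  (List.range sol.length).foldl
    (fun base si => pvAddRow base ((commands.getD si []).map (· * sol.getD si 0)))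
    (List.replicate (commands.getD 0 []).length 0)

-- 'for si in range(len(base)): if base[si] > target[si]: return -1' then 'base == target';
-- the loop is transcribed with an explicit remaining-iteration count (fuel = len(base) - si).
def pvLoopA (target base : List Int) (si : Nat) : Nat → Int
  | 0 => if base = target then 1 else 0
  | fuel + 1 =>
    if base.getD si 0 > target.getD si 0 then -1
    else pvLoopA target base (si + 1) fuel

def valid_f (target : List Int) (commands : List (List Int)) (sol : List Int) (max_clicks : Int) : Int :=
  if sol.sum > max_clicks then -1
  else pvLoopA target (apply_f commands sol) 0 (apply_f commands sol).length

-- ===== PORT B =====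
-- hand port of Python 'zip(*rows)': the columns, up to the length of the shortest row
-- (exact: getD is only read at indices below every row's length).
def pyCols : List (List Int) → List (List Int)
  | [] => []
  | r :: rs =>
    (List.range (rs.foldl (fun m row => min m row.length) r.length)).map
      (fun i => (r :: rs).map (fun row => row.getD i 0))

def valid_f_alt (target : List Int) (commands : List (List Int)) (sol : List Int) (max_clicks : Int) : Int :=
  if sol.sum > max_clicks then -1
  else
    let base := (pyCols commands).map
      (fun col => (sol.zip col).foldl (fun acc p => acc + p.1 * p.2) 0)
    if (base.zip target).any (fun p => decide (p.1 > p.2)) then -1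
    else if base = target then 1 else 0

-- ===== PRECONDITION & SPEC =====
-- Pre_ excludes inputs on which Python A raises IndexError (empty commands, sol longer than
-- commands, a ragged row longer than row 0, target shorter than the width) and the remaining
-- ragged-row inputs, on which zip's truncation legitimately differs from A's per-row index
-- bounds; it is slightly conservative: some excluded inputs make A return -1 early and B
-- agrees there (see claim.json cites).
def Pre_valid_f (target : List Int) (commands : List (List Int)) (sol : List Int) (max_clicks : Int) : Prop :=
  sol.sum ≤ max_clicks →
    (commands ≠ [] ∧ sol.length ≤ commands.length ∧
     (∀ row ∈ commands, row.length = (commands.getD 0 []).length) ∧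
     (commands.getD 0 []).length ≤ target.length)
instance (target : List Int) (commands : List (List Int)) (sol : List Int) (max_clicks : Int) : Decidable (Pre_valid_f target commands sol max_clicks) := by unfold Pre_valid_f; infer_instance

def pvWitness_valid_f : List Int × List (List Int) × List Int × Int :=
  ([5, 3], [[1, 2], [2, 1]], [1, 2], 4)

def Spec_valid_f (target : List Int) (commands : List (List Int)) (sol : List Int) (max_clicks : Int) (out : Int) : Prop := out = valid_f_alt target commands sol max_clicks
instance (target : List Int) (commands : List (List Int)) (sol : List Int) (max_clicks : Int) (out : Int) : Decidable (Spec_valid_f target commands sol max_clicks out) := by unfold Spec_valid_f; infer_instance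

-- ===== CLAIM =====
def Claim_equal_valid_f : Prop := ∀ (target : List Int) (commands : List (List Int)) (sol : List Int) (max_clicks : Int), Dom_valid_f target commands sol max_clicks → Pre_valid_f target commands sol max_clicks → Spec_valid_f target commands sol max_clicks (valid_f target commands sol max_clicks)

-- ===== LEMMAS AND PROOFS =====

-- the A-side column sum (proof artefact: value of apply_f at one index)
def pvColSum (commands : List (List Int)) (sol : List Int) (ind : Nat) : Int :=
  (List.range sol.length).foldl
    (fun acc si =>
      if ind < (commands.getD si []).length then
        acc + (commands.getD si []).getD ind 0 * sol.getD si 0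
      else acc) 0

theorem pvAddRow_length (b c : List Int) : (pvAddRow b c).length = b.length := by
  induction b generalizing c with
  | nil => cases c <;> simp [pvAddRow]
  | cons x bs ih => cases c <;> simp [pvAddRow, ih]

theorem pvAddRow_getD (b c : List Int) (i : Nat) (hc : c.length ≤ b.length) :
    (pvAddRow b c).getD i 0 = b.getD i 0 + (if i < c.length then c.getD i 0 else 0) := by
  induction b generalizing c i with
  | nil =>
    have : c = [] := by cases c <;> simp_all
    subst this; simp [pvAddRow]
  | cons x bs ih =>
    cases c with
    | nil => simp [pvAddRow]
    | cons y cs =>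
      cases i with
      | zero => simp [pvAddRow]
      | succ j =>
        simp only [pvAddRow, List.getD_cons_succ, List.length_cons]
        rw [ih cs j (by simpa using hc)]
        simp

theorem apply_f_loop_length (commands : List (List Int)) (sol : List Int) (m : Nat) (b : List Int) :
    (((List.range m).foldl
      (fun base si => pvAddRow base ((commands.getD si []).map (· * sol.getD si 0))) b)).length
    = b.length := by
  induction m generalizing b with
  | zero => simp
  | succ k ih =>
    rw [List.range_succ, List.foldl_append]
    simp only [List.foldl_cons, List.foldl_nil, pvAddRow_length]
    exact ih b

theorem getD_map_mul (l : List Int) (s : Int) (i : Nat) (h : i < l.length) :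
    (l.map (· * s)).getD i 0 = l.getD i 0 * s := by
  rw [List.getD_eq_getElem _ 0 (by simpa using h), List.getD_eq_getElem _ 0 h, List.getElem_map]

theorem apply_f_loop_getD (commands : List (List Int)) (sol : List Int) (m : Nat) (b : List Int)
    (ind : Nat)
    (hrows : ∀ si, si < m → (commands.getD si []).length ≤ b.length) :
    (((List.range m).foldl
      (fun base si => pvAddRow base ((commands.getD si []).map (· * sol.getD si 0))) b)).getD ind 0
    = b.getD ind 0 +
      (List.range m).foldl
        (fun acc si =>
          if ind < (commands.getD si []).length then
            acc + (commands.getD si []).getD ind 0 * sol.getD si 0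
          else acc) 0 := by
  induction m with
  | zero => simp
  | succ k ih =>
    rw [List.range_succ, List.foldl_append, List.foldl_append]
    simp only [List.foldl_cons, List.foldl_nil]
    rw [pvAddRow_getD _ _ _ (by
      rw [apply_f_loop_length]
      simpa using hrows k (Nat.lt_succ_self k))]
    rw [ih (fun si h => hrows si (Nat.lt_succ_of_lt h))]
    by_cases h : ind < (commands.getD k []).length
    · simp only [List.length_map, h, if_pos]
      rw [getD_map_mul _ _ _ h]
      ring
    · simp only [List.length_map, h, if_neg, not_false_iff]
      ring

theorem apply_f_length (commands : List (List Int)) (sol : List Int) :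
    (apply_f commands sol).length = (commands.getD 0 []).length := by
  unfold apply_f; rw [apply_f_loop_length]; simp

theorem apply_f_getD (commands : List (List Int)) (sol : List Int) (ind : Nat)
    (hrows : ∀ si, si < sol.length →
      (commands.getD si []).length ≤ (commands.getD 0 []).length) :
    (apply_f commands sol).getD ind 0 = pvColSum commands sol ind := by
  unfold apply_f pvColSum
  rw [apply_f_loop_getD]
  · simp
  · intro si h; simpa using hrows si h

-- rectangular matrix ⇒ the foldl-min over the tail is the head's length
theorem foldl_min_const (w : Nat) (rs : List (List Int)) (h : ∀ row ∈ rs, row.length = w) :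
    rs.foldl (fun m row => min m row.length) w = w := by
  induction rs with
  | nil => rfl
  | cons r rs ih =>
    simp only [List.foldl_cons, h r (List.mem_cons_self), min_self]
    exact ih (fun row hm => h row (List.mem_cons_of_mem _ hm))

theorem pyCols_rect (c : List Int) (cs : List (List Int))
    (h : ∀ row ∈ c :: cs, row.length = c.length) :
    pyCols (c :: cs) = (List.range c.length).map
      (fun i => (c :: cs).map (fun row => row.getD i 0)) := by
  simp only [pyCols]
  rw [foldl_min_const c.length cs (fun row hm => h row (List.mem_cons_of_mem _ hm))]

-- B's dot product over a zipped column equals A's indexed column sum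
theorem dot_eq_colSum (commands : List (List Int)) (sol : List Int) (ind : Nat)
    (hsl : sol.length ≤ commands.length)
    (hrows : ∀ si, si < sol.length → ind < (commands.getD si []).length) :
    (sol.zip (commands.map (fun row => row.getD ind 0))).foldl
      (fun acc p => acc + p.1 * p.2) 0
    = pvColSum commands sol ind := by
  unfold pvColSum
  rw [PySem.List.foldl_add]
  rw [show (List.range sol.length).foldl
        (fun acc si =>
          if ind < (commands.getD si []).length then
            acc + (commands.getD si []).getD ind 0 * sol.getD si 0
          else acc) 0
      = (List.range sol.length).foldl
          (fun acc si => acc + (commands.getD si []).getD ind 0 * sol.getD si 0) 0 from by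
    apply PySem.List.foldl_congr_mem
    intro acc si hm
    have hsi : si < sol.length := List.mem_range.mp hm
    rw [if_pos (hrows si hsi)]]
  rw [PySem.List.foldl_add]
  simp only [Int.zero_add]
  congr 1
  apply List.ext_getElem
  · simp [Nat.min_eq_left hsl]
  · intro j h1 h2
    have hj : j < sol.length := by
      simpa [Nat.min_eq_left hsl] using h1
    have hjc : j < commands.length := lt_of_lt_of_le hj hsl
    simp only [List.getElem_map, List.getElem_zip, List.getElem_range,
      List.getD_eq_getElem sol 0 hj, List.getD_eq_getElem commands [] hjc]
    exact Int.mul_comm _ _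

-- A's base vector is B's base list on the rectangular domain
theorem base_eq (commands : List (List Int)) (sol : List Int)
    (hne : commands ≠ [])
    (hsl : sol.length ≤ commands.length)
    (hrect : ∀ row ∈ commands, row.length = (commands.getD 0 []).length) :
    apply_f commands sol
      = (pyCols commands).map
          (fun col => (sol.zip col).foldl (fun acc p => acc + p.1 * p.2) 0) := by
  obtain ⟨c, cs, rfl⟩ : ∃ c cs, commands = c :: cs := by
    cases commands with
    | nil => exact absurd rfl hne
    | cons c cs => exact ⟨c, cs, rfl⟩
  have hw : (List.getD (c :: cs) 0 []).length = c.length := by simp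
  rw [pyCols_rect c cs (by simpa [hw] using hrect)]
  have hrows : ∀ si, si < sol.length →
      ((c :: cs).getD si []).length ≤ ((c :: cs).getD 0 []).length := by
    intro si hsi
    have : (c :: cs).getD si [] ∈ c :: cs := by
      rw [List.getD_eq_getElem _ [] (lt_of_lt_of_le hsi hsl)]
      exact List.getElem_mem _
    rw [hrect _ this]
  apply List.ext_getElem
  · simp [apply_f_length]
  · intro j h1 h2
    have hjw : j < c.length := by
      simpa [apply_f_length, hw] using h1
    rw [← List.getD_eq_getElem _ 0 h1, apply_f_getD _ _ _ hrows]
    simp only [List.getElem_map, List.getElem_range]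
    refine (dot_eq_colSum _ _ _ hsl ?_).symm
    intro si hsi
    have hmem : (c :: cs).getD si [] ∈ c :: cs := by
      rw [List.getD_eq_getElem _ [] (lt_of_lt_of_le hsi hsl)]
      exact List.getElem_mem _
    rw [hrect _ hmem, hw]
    exact hjw

-- A's scan-then-compare loop equals B's any()/equality classification
theorem loopA_char (target base : List Int) (hlt : base.length ≤ target.length) :
    ∀ fuel si, si + fuel = base.length →
      pvLoopA target base si fuel =
        if ((base.zip target).drop si).any (fun p => decide (p.1 > p.2)) then -1
        else if base = target then 1 else 0 := by
  intro fuel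
  induction fuel with
  | zero =>
    intro si hsi
    have : (base.zip target).length ≤ si := by
      simp [Nat.min_eq_left hlt]; omega
    rw [List.drop_eq_nil_of_le this]
    simp [pvLoopA]
  | succ k ih =>
    intro si hsi
    have hsb : si < base.length := by omega
    have hst : si < target.length := lt_of_lt_of_le hsb hlt
    have hsz : si < (base.zip target).length := by
      simp [Nat.min_eq_left hlt]; omega
    rw [List.drop_eq_getElem_cons hsz]
    simp only [pvLoopA, List.any_cons, List.getElem_zip,
      List.getD_eq_getElem base 0 hsb, List.getD_eq_getElem target 0 hst]
    by_cases hgt : base[si] > target[si]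
    · simp [hgt]
    · simp only [hgt, decide_false, Bool.false_or]
      exact ih (si + 1) (by omega)

-- ===== VERDICT =====
theorem valid_f_spec : Claim_equal_valid_f := by
  intro target commands sol max_clicks _ hpre
  unfold Spec_valid_f valid_f valid_f_alt
  by_cases hs : sol.sum > max_clicks
  · rw [if_pos hs, if_pos hs]
  · rw [if_neg hs, if_neg hs]
    obtain ⟨hne, hsl, hrect, htl⟩ := hpre (by omega)
    have hbe := base_eq commands sol hne hsl hrect
    simp only [← hbe]
    rw [loopA_char target (apply_f commands sol)
      (by rw [apply_f_length]; exact htl) (apply_f commands sol).length 0 (by omega)]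
    simp
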